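-- pv_equiv track=rewrite | github.com/Aayushmaan-24/AdventOfCode-25 | day2part2.py | generateDoublePatterns
-- ===== SOURCE A (Python) =====
-- def generateDoublePatterns(max_n: int):
--     candidates = []
--     max_len = len(str(max_n))
--     for k in range(1, max_len):
--         max_r = max_len // k
--         if max_r < 2:
--             break
--         base = 10 ** k
--         for r in range(2, max_r+1):
--             factor = (base ** r -1 ) // (base -1)
--             s_min = 10 ** (k-1)
--             s_max = min(10**k-1, max_n // factor)
--             if s_min > s_max:
--                 continue
--             for s in range(s_min, s_max+1):
--                 n = s*factor
--                 candidates.append(n)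
--     candidates = sorted(set(candidates))
--     return candidates
-- ===== SOURCE B (Python) =====
-- def generateDoublePatterns(max_n: int):
--     found = set()
--     half = len(str(max_n)) // 2
--     for b in range(1, 10 ** half):
--         shift = 10 ** len(str(b))
--         n = b * shift + b
--         while n <= max_n:
--             found.add(n)
--             n = n * shift + b
--     return sorted(found)
-- ===== Notes on version B (the rewrite author's own statement) =====
-- stated objective: simpler
-- what changed: B drops the precomputed geometric factor and the per-(digit-length, repeat-count) s-ranges: it loops once over block values b, repeatedly appends the block arithmetically (n = n*shift + b) while n <= max_n, collects into a set and returns it sorted.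
import Mathlib
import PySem

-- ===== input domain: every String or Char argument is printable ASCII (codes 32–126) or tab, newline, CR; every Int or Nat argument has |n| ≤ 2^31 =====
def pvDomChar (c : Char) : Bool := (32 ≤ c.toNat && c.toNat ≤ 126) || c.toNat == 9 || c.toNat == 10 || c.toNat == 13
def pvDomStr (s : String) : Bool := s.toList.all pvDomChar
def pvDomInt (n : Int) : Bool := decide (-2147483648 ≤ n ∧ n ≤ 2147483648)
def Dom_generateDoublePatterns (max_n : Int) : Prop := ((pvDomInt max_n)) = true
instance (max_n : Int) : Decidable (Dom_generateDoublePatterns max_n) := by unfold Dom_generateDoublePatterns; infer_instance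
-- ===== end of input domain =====

-- B generates each repeated-block number directly (one loop over the block value, growing the
-- repetition while it stays ≤ max_n) instead of A's per-(length, repeat-count) ranges bounded by a
-- precomputed geometric factor; objective: simpler.

-- ===== PORT A =====
-- inner 'for r in range(2, max_r+1): … for s in range(s_min, s_max+1): candidates.append(s*factor)'
def loopRS (max_n max_len k : Int) (cand : List Int) : List Int :=
  let max_r := PySem.Int.floordiv max_len k
  let base : Int := 10 ^ k.toNat
  (PySem.List.pyRange 2 (max_r + 1) 1).foldl (fun c r =>
    let factor := PySem.Int.floordiv (base ^ r.toNat - 1) (base - 1)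
    let s_min : Int := 10 ^ (k - 1).toNat
    let s_max : Int := min (10 ^ k.toNat - 1) (PySem.Int.floordiv max_n factor)
    if s_min > s_max then c
    else (PySem.List.pyRange s_min (s_max + 1) 1).foldl (fun c2 s => c2 ++ [s * factor]) c) cand

-- outer 'for k in range(1, max_len): if max_len // k < 2: break; …' (recursion so the break stops the loop)
def loopK (max_n max_len : Int) : List Int → List Int → List Int
  | [], cand => cand
  | k :: ks, cand =>
    if PySem.Int.floordiv max_len k < 2 then cand
    else loopK max_n max_len ks (loopRS max_n max_len k cand)

def generateDoublePatterns (max_n : Int) : List Int :=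
  let max_len := PySem.Str.len (PySem.Int.toStr max_n)
  let candidates := loopK max_n max_len (PySem.List.pyRange 1 max_len 1) []
  PySem.List.sorted (PySem.Set.ofList candidates) (fun x => x) false

-- ===== PORT B =====
-- 'n = b*shift + b; while n <= max_n: found.add(n); n = n*shift + b'
-- (the dite guard 'n < n*shift + b' only serves termination; it holds on every call the port makes)
def growB (max_n shift b : Int) (n : Int) (acc : PySem.Set Int) : PySem.Set Int :=
  if n ≤ max_n then
    if _h : n < n * shift + b then growB max_n shift b (n * shift + b) (PySem.Set.add acc n)
    else PySem.Set.add acc n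
  else acc
termination_by (max_n + 1 - n).toNat
decreasing_by omega

def generateDoublePatterns_alt (max_n : Int) : List Int :=
  let half := PySem.Int.floordiv (PySem.Str.len (PySem.Int.toStr max_n)) 2
  let found := (PySem.List.pyRange 1 (10 ^ half.toNat) 1).foldl
    (fun acc b =>
      let shift : Int := 10 ^ (PySem.Str.len (PySem.Int.toStr b)).toNat
      growB max_n shift b (b * shift + b) acc)
    PySem.Set.empty
  PySem.List.sorted found (fun x => x) false

-- ===== PRECONDITION & SPEC =====
def Spec_generateDoublePatterns (max_n : Int) (out : List Int) : Prop := out = generateDoublePatterns_alt max_n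
instance (max_n : Int) (out : List Int) : Decidable (Spec_generateDoublePatterns max_n out) := by unfold Spec_generateDoublePatterns; infer_instance

-- ===== CLAIM (what is proved, stated in full; the proofs are below) =====
def Claim_equal_generateDoublePatterns : Prop := ∀ (max_n : Int), Dom_generateDoublePatterns max_n → Spec_generateDoublePatterns max_n (generateDoublePatterns max_n)

-- ===== LEMMAS AND PROOFS =====

-- str(n) for n ≥ 1 has Nat.log 10 n + 1 characters, and that length brackets n between powers of 10
lemma len_toDigitsCore (f : Nat) : ∀ (n : Nat) (l : List Char), n < f →
    (Nat.toDigitsCore 10 f n l).length = l.length + Nat.log 10 n + 1 := by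
  induction f with
  | zero => omega
  | succ f ih =>
    intro n l hn
    rw [Nat.toDigitsCore]
    by_cases h : n / 10 = 0
    · have hlt : n < 10 := by omega
      simp [h, Nat.log_eq_zero_iff.mpr (Or.inl hlt)]
    · have h10 : 10 ≤ n := by omega
      simp only [h, if_false]
      rw [ih (n / 10) _ (by omega)]
      have := Nat.log_div_base 10 n
      have : 0 < Nat.log 10 n := Nat.log_pos (by norm_num) h10
      simp only [List.length_cons]
      omega

lemma strlen_toStr_of_pos (m : Int) (h : 1 ≤ m) :
    PySem.Str.len (PySem.Int.toStr m) = (Nat.log 10 m.toNat : Int) + 1 := by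
  rw [PySem.Str.len_eq, PySem.Int.toList_toStr]
  unfold PySem.Int.toChars
  rw [if_neg (by omega)]
  unfold Nat.toDigits
  rw [len_toDigitsCore _ _ _ (by omega)]
  push_cast
  simp

lemma digit_bounds (m : Int) (h : 1 ≤ m) :
    (10 : Int) ^ (Nat.log 10 m.toNat) ≤ m ∧ m < 10 ^ (Nat.log 10 m.toNat + 1) := by
  have h1 := Nat.pow_log_le_self 10 (x := m.toNat) (by omega)
  have h2 := Nat.lt_pow_succ_log_self (b := 10) (by norm_num) m.toNat
  constructor
  · have := (Int.ofNat_le.mpr h1); push_cast at this ⊢; omega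
  · have := (Int.ofNat_lt.mpr h2); push_cast at this ⊢; omega

-- the repunit factor 1 + base + … + base^(r-1)
def geom (base : Int) : Nat → Int
  | 0 => 0
  | r + 1 => geom base r * base + 1

lemma geom_mul (base : Int) (r : Nat) : (base - 1) * geom base r = base ^ r - 1 := by
  induction r with
  | zero => simp [geom]
  | succ r ih => rw [geom, pow_succ]; linear_combination base * ih

lemma factor_eq_geom (base : Int) (hb : 2 ≤ base) (r : Nat) :
    PySem.Int.floordiv (base ^ r - 1) (base - 1) = geom base r := by
  rw [PySem.Int.floordiv_eq_ediv_of_pos (by omega), ← geom_mul,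
    Int.mul_ediv_cancel_left _ (by omega)]

lemma geom_nonneg (base : Int) (hb : 1 ≤ base) (r : Nat) : 0 ≤ geom base r := by
  induction r with
  | zero => simp [geom]
  | succ r ih => rw [geom]; nlinarith

lemma geom_pos (base : Int) (hb : 1 ≤ base) (r : Nat) (hr : 1 ≤ r) : 1 ≤ geom base r := by
  obtain ⟨t, rfl⟩ : ∃ t, r = t + 1 := ⟨r - 1, by omega⟩
  rw [geom]; nlinarith [geom_nonneg base hb t]

lemma geom_lower (base : Int) (hb : 1 ≤ base) (r : Nat) (hr : 1 ≤ r) :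
    base ^ (r - 1) ≤ geom base r := by
  induction r with
  | zero => omega
  | succ r ih =>
    rcases Nat.eq_zero_or_pos r with hr0 | hr1
    · subst hr0; simp [geom]
    · have h1 := ih hr1
      obtain ⟨t, rfl⟩ : ∃ t, r = t + 1 := ⟨r - 1, by omega⟩
      rw [geom]
      have : base ^ (t + 1) = base ^ t * base := pow_succ base t
      simp only [Nat.add_sub_cancel] at *
      nlinarith [pow_nonneg (by omega : (0:Int) ≤ base) t]

-- membership in A's candidate list
lemma mem_loopRS (max_n max_len k : Int) (cand : List Int) (n : Int) :
    n ∈ loopRS max_n max_len k cand ↔ n ∈ cand ∨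
      ∃ r : Int, 2 ≤ r ∧ r ≤ PySem.Int.floordiv max_len k ∧
        ∃ s : Int, (10 : Int) ^ (k - 1).toNat ≤ s ∧
          s ≤ min ((10 : Int) ^ k.toNat - 1)
              (PySem.Int.floordiv max_n (PySem.Int.floordiv (((10 : Int) ^ k.toNat) ^ r.toNat - 1) ((10 : Int) ^ k.toNat - 1))) ∧
          n = s * PySem.Int.floordiv (((10 : Int) ^ k.toNat) ^ r.toNat - 1) ((10 : Int) ^ k.toNat - 1) := by
  unfold loopRS
  simp only []
  rw [show (fun (c : List Int) (r : Int) =>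
      let factor := PySem.Int.floordiv (((10 : Int) ^ k.toNat) ^ r.toNat - 1) ((10 : Int) ^ k.toNat - 1)
      let s_min : Int := 10 ^ (k - 1).toNat
      let s_max : Int := min ((10 : Int) ^ k.toNat - 1) (PySem.Int.floordiv max_n factor)
      if s_min > s_max then c
      else (PySem.List.pyRange s_min (s_max + 1) 1).foldl (fun c2 s => c2 ++ [s * factor]) c)
    = (fun (c : List Int) (r : Int) =>
      c ++ (if (10 : Int) ^ (k - 1).toNat > min ((10 : Int) ^ k.toNat - 1) (PySem.Int.floordiv max_n (PySem.Int.floordiv (((10 : Int) ^ k.toNat) ^ r.toNat - 1) ((10 : Int) ^ k.toNat - 1))) then []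
         else (PySem.List.pyRange ((10 : Int) ^ (k - 1).toNat) ((min ((10 : Int) ^ k.toNat - 1) (PySem.Int.floordiv max_n (PySem.Int.floordiv (((10 : Int) ^ k.toNat) ^ r.toNat - 1) ((10 : Int) ^ k.toNat - 1)))) + 1) 1).map (fun s => s * PySem.Int.floordiv (((10 : Int) ^ k.toNat) ^ r.toNat - 1) ((10 : Int) ^ k.toNat - 1))))
    from by
      funext c r
      simp only []
      split_ifs with h
      · simp
      · rw [PySem.List.foldl_append_singleton_eq_map]]
  rw [PySem.List.foldl_append_eq_flatMap]
  simp only [List.mem_append, List.mem_flatMap, PySem.List.mem_pyRange_one]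
  constructor
  · rintro (h | ⟨r, ⟨hr2, hrlt⟩, hmem⟩)
    · exact Or.inl h
    · refine Or.inr ⟨r, hr2, by omega, ?_⟩
      split_ifs at hmem with hcond
      · simp at hmem
      · simp only [List.mem_map, PySem.List.mem_pyRange_one] at hmem
        obtain ⟨s, ⟨h1, h2⟩, rfl⟩ := hmem
        exact ⟨s, h1, by omega, rfl⟩
  · rintro (h | ⟨r, hr2, hrle, s, h1, h2, rfl⟩)
    · exact Or.inl h
    · refine Or.inr ⟨r, ⟨hr2, by omega⟩, ?_⟩
      rw [if_neg (by omega)]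
      simp only [List.mem_map, PySem.List.mem_pyRange_one]
      exact ⟨s, ⟨h1, by omega⟩, rfl⟩

lemma ten_pow_two_le (K : Nat) (h : 1 ≤ K) : (2:Int) ≤ 10 ^ K := by
  calc (2:Int) ≤ 10 ^ 1 := by norm_num
  _ ≤ 10 ^ K := by exact pow_le_pow_right₀ (by norm_num) h

lemma mem_loopK (max_n max_len : Int) : ∀ (fuel : Nat) (a : Int), (max_len - a).toNat ≤ fuel → 1 ≤ a →
    ∀ (cand : List Int) (n : Int),
    (n ∈ loopK max_n max_len (PySem.List.pyRange a max_len 1) cand ↔ n ∈ cand ∨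
      ∃ k : Int, a ≤ k ∧ 2 * k ≤ max_len ∧
        ∃ r : Int, 2 ≤ r ∧ r * k ≤ max_len ∧
          ∃ s : Int, (10 : Int) ^ (k - 1).toNat ≤ s ∧ s ≤ (10 : Int) ^ k.toNat - 1 ∧
            s * geom ((10 : Int) ^ k.toNat) r.toNat ≤ max_n ∧
            n = s * geom ((10 : Int) ^ k.toNat) r.toNat) := by
  intro fuel
  induction fuel with
  | zero =>
    intro a hf ha cand n
    have : max_len ≤ a := by omega
    rw [PySem.List.pyRange_one_eq_nil this, loopK]
    constructor
    · exact Or.inl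
    · rintro (h | ⟨k, hak, h2k, -⟩)
      · exact h
      · omega
  | succ fuel ih =>
    intro a hf ha cand n
    rcases le_or_gt max_len a with hle | hlt
    · rw [PySem.List.pyRange_one_eq_nil hle, loopK]
      constructor
      · exact Or.inl
      · rintro (h | ⟨k, hak, h2k, -⟩)
        · exact h
        · omega
    · rw [PySem.List.pyRange_one_cons hlt, loopK]
      have hbase2 : (2:Int) ≤ 10 ^ a.toNat := ten_pow_two_le a.toNat (by omega)
      by_cases hbr : PySem.Int.floordiv max_len a < 2
      · rw [if_pos hbr]
        have h2a : ¬ (2 * a ≤ max_len) := by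
          intro hcon
          have : (2:Int) ≤ PySem.Int.floordiv max_len a :=
            (PySem.Int.le_floordiv_iff_mul_le (show (0:Int) < a by omega)).mpr hcon
          omega
        constructor
        · exact Or.inl
        · rintro (h | ⟨k, hak, h2k, -⟩)
          · exact h
          · omega
      · rw [if_neg hbr]
        rw [ih (a + 1) (by omega) (by omega)]
        rw [mem_loopRS]
        have h2a : 2 * a ≤ max_len := (PySem.Int.le_floordiv_iff_mul_le (by omega)).mp (by omega)
        constructor
        · rintro ((h | ⟨r, hr2, hrle, s, hs1, hs2, hneq⟩) | ⟨k, hak, h2k, rest⟩)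
          · exact Or.inl h
          · have hfac := factor_eq_geom ((10:Int) ^ a.toNat) hbase2 r.toNat
            have hgpos : (1:Int) ≤ geom ((10:Int) ^ a.toNat) r.toNat :=
              geom_pos _ (by omega) _ (by omega)
            rw [hfac] at hs2 hneq
            refine Or.inr ⟨a, le_refl a, h2a, r, hr2,
              (PySem.Int.le_floordiv_iff_mul_le (by omega)).mp hrle, s, hs1,
              (le_min_iff.mp hs2).1, ?_, hneq⟩
            exact (PySem.Int.le_floordiv_iff_mul_le (by omega)).mp (le_min_iff.mp hs2).2
          · exact Or.inr ⟨k, by omega, h2k, rest⟩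
        · rintro (h | ⟨k, hak, h2k, r, hr2, hrk, s, hs1, hs2, hsf, hneq⟩)
          · exact Or.inl (Or.inl h)
          · rcases eq_or_lt_of_le hak with rfl | hklt
            · have hfac := factor_eq_geom ((10:Int) ^ a.toNat) hbase2 r.toNat
              have hgpos : (1:Int) ≤ geom ((10:Int) ^ a.toNat) r.toNat :=
                geom_pos _ (by omega) _ (by omega)
              refine Or.inl (Or.inr ⟨r, hr2,
                (PySem.Int.le_floordiv_iff_mul_le (by omega)).mpr hrk, s, hs1, ?_, ?_⟩)
              · rw [hfac]
                exact le_min_iff.mpr ⟨hs2, (PySem.Int.le_floordiv_iff_mul_le (by omega)).mpr hsf⟩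
              · rw [hfac]; exact hneq
            · exact Or.inr ⟨k, by omega, h2k, r, hr2, hrk, s, hs1, hs2, hsf, hneq⟩

-- membership in B's set
def iterB (shift b : Int) : Nat → Int → Int
  | 0, n => n
  | j + 1, n => iterB shift b j (n * shift + b)

lemma iterB_le (shift b : Int) (hs : 2 ≤ shift) (hb : 1 ≤ b) :
    ∀ (j : Nat) (n : Int), 1 ≤ n → n ≤ iterB shift b j n ∧ 1 ≤ iterB shift b j n := by
  intro j
  induction j with
  | zero => intro n h; exact ⟨le_refl _, h⟩
  | succ j ih =>
    intro n h
    have h1 : n ≤ n * shift + b := by nlinarith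
    have := ih (n * shift + b) (by nlinarith)
    rw [iterB]
    exact ⟨le_trans h1 this.1, this.2⟩

lemma iterB_geom (shift b : Int) : ∀ (j m : Nat),
    iterB shift b j (b * geom shift m) = b * geom shift (m + j) := by
  intro j
  induction j with
  | zero => intro m; rfl
  | succ j ih =>
    intro m
    rw [iterB]
    have h1 : b * geom shift m * shift + b = b * geom shift (m + 1) := by rw [geom]; ring
    rw [h1, ih (m + 1)]
    have h2 : m + 1 + j = m + (j + 1) := by omega
    rw [h2]

lemma iterB_closed (shift b : Int) (j : Nat) :
    iterB shift b j (b * shift + b) = b * geom shift (2 + j) := by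
  have h : b * shift + b = b * geom shift 2 := by simp [geom]; ring
  rw [h, iterB_geom]

lemma mem_growB (max_n shift b : Int) (hs : 2 ≤ shift) (hb : 1 ≤ b) :
    ∀ (fuel : Nat) (n0 : Int), (max_n + 1 - n0).toNat ≤ fuel → 1 ≤ n0 →
    ∀ (acc : PySem.Set Int) (x : Int),
    (x ∈ growB max_n shift b n0 acc ↔ x ∈ acc ∨
      ∃ j : Nat, x = iterB shift b j n0 ∧ iterB shift b j n0 ≤ max_n) := by
  intro fuel
  induction fuel with
  | zero =>
    intro n0 hf h0 acc x
    have hno : ¬ n0 ≤ max_n := by omega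
    rw [growB, if_neg hno]
    constructor
    · exact Or.inl
    · rintro (hx | ⟨j, rfl, hj⟩)
      · exact hx
      · exact absurd hj (by have := iterB_le shift b hs hb j n0 h0; omega)
  | succ fuel ih =>
    intro n0 hf h0 acc x
    by_cases hno : n0 ≤ max_n
    · have hlt : n0 < n0 * shift + b := by nlinarith
      rw [growB, if_pos hno, dif_pos hlt]
      rw [ih (n0 * shift + b) (by omega) (by nlinarith)]
      rw [PySem.Set.mem_add]
      constructor
      · rintro ((hx | rfl) | ⟨j, rfl, hj⟩)
        · exact Or.inl hx
        · exact Or.inr ⟨0, rfl, hno⟩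
        · exact Or.inr ⟨j + 1, rfl, hj⟩
      · rintro (hx | ⟨j, rfl, hj⟩)
        · exact Or.inl (Or.inl hx)
        · cases j with
          | zero => exact Or.inl (Or.inr rfl)
          | succ j => exact Or.inr ⟨j, rfl, hj⟩
    · rw [growB, if_neg hno]
      constructor
      · exact Or.inl
      · rintro (hx | ⟨j, rfl, hj⟩)
        · exact hx
        · exact absurd hj (by have := iterB_le shift b hs hb j n0 h0; omega)

lemma nodup_growB (max_n shift b : Int) (n0 : Int) (acc : PySem.Set Int) :
    acc.Nodup → (growB max_n shift b n0 acc).Nodup := by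
  fun_induction growB max_n shift b n0 acc with
  | case1 n acc h1 h2 ih => intro h; exact ih (PySem.Set.nodup_add acc n h)
  | case2 n acc h1 h2 => intro h; exact PySem.Set.nodup_add acc n h
  | case3 n acc h1 => intro h; exact h

lemma shift_ge (b : Int) (hb : 1 ≤ b) : (2:Int) ≤ 10 ^ (PySem.Str.len (PySem.Int.toStr b)).toNat := by
  rw [strlen_toStr_of_pos b hb]
  calc (2:Int) ≤ 10 ^ 1 := by norm_num
  _ ≤ _ := pow_le_pow_right₀ (by norm_num) (by omega)

lemma mem_foldB (max_n : Int) :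
    ∀ (bs : List Int), (∀ b ∈ bs, 1 ≤ b) → ∀ (acc : PySem.Set Int) (x : Int),
    (x ∈ bs.foldl (fun acc b =>
        growB max_n (10 ^ (PySem.Str.len (PySem.Int.toStr b)).toNat) b
          (b * 10 ^ (PySem.Str.len (PySem.Int.toStr b)).toNat + b) acc) acc ↔
      x ∈ acc ∨ ∃ b ∈ bs, ∃ j : Nat,
        x = iterB ((10:Int) ^ (PySem.Str.len (PySem.Int.toStr b)).toNat) b j
              (b * 10 ^ (PySem.Str.len (PySem.Int.toStr b)).toNat + b) ∧
        iterB ((10:Int) ^ (PySem.Str.len (PySem.Int.toStr b)).toNat) b j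
              (b * 10 ^ (PySem.Str.len (PySem.Int.toStr b)).toNat + b) ≤ max_n) := by
  intro bs
  induction bs with
  | nil => intro _ acc x; simp
  | cons b bs ih =>
    intro hpos acc x
    have hb : 1 ≤ b := hpos b List.mem_cons_self
    have hs := shift_ge b hb
    rw [List.foldl_cons]
    rw [ih (fun y hy => hpos y (List.mem_cons_of_mem b hy))]
    rw [mem_growB max_n _ b hs hb (max_n + 1 - (b * 10 ^ (PySem.Str.len (PySem.Int.toStr b)).toNat + b)).toNat
      _ (le_refl _) (by nlinarith) acc x]
    simp only [List.mem_cons]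
    constructor
    · rintro ((h | ⟨j, hj⟩) | ⟨c, hc, hj⟩)
      · exact Or.inl h
      · exact Or.inr ⟨b, Or.inl rfl, j, hj⟩
      · exact Or.inr ⟨c, Or.inr hc, hj⟩
    · rintro (h | ⟨c, (rfl | hc), hj⟩)
      · exact Or.inl (Or.inl h)
      · exact Or.inl (Or.inr hj)
      · exact Or.inr ⟨c, hc, hj⟩

lemma nodup_foldB (max_n : Int) :
    ∀ (bs : List Int) (acc : PySem.Set Int), acc.Nodup →
    (bs.foldl (fun acc b =>
        growB max_n (10 ^ (PySem.Str.len (PySem.Int.toStr b)).toNat) b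
          (b * 10 ^ (PySem.Str.len (PySem.Int.toStr b)).toNat + b) acc) acc).Nodup := by
  intro bs
  induction bs with
  | nil => intro acc h; exact h
  | cons b bs ih => intro acc h; exact ih _ (nodup_growB _ _ _ _ _ h)

lemma pow_exp_lt {a c : Nat} (h : (10:Int) ^ a < 10 ^ c) : a < c := by
  by_contra hc
  exact absurd h (not_lt.mpr (pow_le_pow_right₀ (by norm_num) (by omega)))

-- the two candidate sets coincide
lemma main_iff (max_n n : Int) :
    (∃ k : Int, 1 ≤ k ∧ 2 * k ≤ PySem.Str.len (PySem.Int.toStr max_n) ∧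
      ∃ r : Int, 2 ≤ r ∧ r * k ≤ PySem.Str.len (PySem.Int.toStr max_n) ∧
        ∃ s : Int, (10 : Int) ^ (k - 1).toNat ≤ s ∧ s ≤ (10 : Int) ^ k.toNat - 1 ∧
          s * geom ((10 : Int) ^ k.toNat) r.toNat ≤ max_n ∧
          n = s * geom ((10 : Int) ^ k.toNat) r.toNat) ↔
    (∃ b : Int, (1 ≤ b ∧ b < 10 ^ (PySem.Int.floordiv (PySem.Str.len (PySem.Int.toStr max_n)) 2).toNat) ∧
      ∃ j : Nat,
        n = iterB ((10:Int) ^ (PySem.Str.len (PySem.Int.toStr b)).toNat) b j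
              (b * 10 ^ (PySem.Str.len (PySem.Int.toStr b)).toNat + b) ∧
        iterB ((10:Int) ^ (PySem.Str.len (PySem.Int.toStr b)).toNat) b j
              (b * 10 ^ (PySem.Str.len (PySem.Int.toStr b)).toNat + b) ≤ max_n) := by
  constructor
  · rintro ⟨k, hk1, h2k, r, hr2, hrk, s, hs1, hs2, hsm, rfl⟩
    have hK : k = (k.toNat : Int) := by omega
    set K := k.toNat with hKdef
    have hK1 : 1 ≤ K := by omega
    have hkm1 : (k - 1).toNat = K - 1 := by omega
    have hs0 : (1:Int) ≤ s := le_trans (one_le_pow₀ (by norm_num : (1:Int) ≤ 10)) hs1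
    have hgpos : (1:Int) ≤ geom ((10:Int) ^ K) r.toNat :=
      geom_pos _ (one_le_pow₀ (by norm_num)) _ (by omega)
    have hmax1 : (1:Int) ≤ max_n := le_trans (by nlinarith) hsm
    have hsu : s < (10:Int) ^ K := by omega
    have hsl : (10:Int) ^ (K - 1) ≤ s := by rw [← hkm1]; exact hs1
    have hlogs : Nat.log 10 s.toNat = K - 1 := by
      apply Nat.log_eq_of_pow_le_of_lt_pow
      · zify
        rw [Int.toNat_of_nonneg (by omega)]
        exact hsl
      · have hKK : K - 1 + 1 = K := by omega
        rw [hKK]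
        zify
        rw [Int.toNat_of_nonneg (by omega)]
        exact hsu
    have hlens : (PySem.Str.len (PySem.Int.toStr s)).toNat = K := by
      rw [strlen_toStr_of_pos s hs0, hlogs]; omega
    have hL := strlen_toStr_of_pos max_n hmax1
    have hhalf : (k : Int) ≤ PySem.Int.floordiv (PySem.Str.len (PySem.Int.toStr max_n)) 2 :=
      (PySem.Int.le_floordiv_iff_mul_le (by norm_num)).mpr (by omega)
    have hsB : s < (10:Int) ^ (PySem.Int.floordiv (PySem.Str.len (PySem.Int.toStr max_n)) 2).toNat :=
      lt_of_lt_of_le hsu (pow_le_pow_right₀ (by norm_num) (by omega))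
    refine ⟨s, ⟨hs0, hsB⟩, r.toNat - 2, ?_, ?_⟩
    · rw [hlens, iterB_closed]
      congr 2
      omega
    · rw [hlens, iterB_closed]
      have : 2 + (r.toNat - 2) = r.toNat := by omega
      rw [this]
      exact hsm
  · rintro ⟨b, ⟨hb1, hbB⟩, j, hneq, hle⟩
    have hlenb := strlen_toStr_of_pos b hb1
    set Kb := (PySem.Str.len (PySem.Int.toStr b)).toNat with hKbdef
    have hKb1 : 1 ≤ Kb := by omega
    have hKbe : Kb = Nat.log 10 b.toNat + 1 := by omega
    rw [iterB_closed] at hneq hle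
    have hgpos : (1:Int) ≤ geom ((10:Int) ^ Kb) (2 + j) :=
      geom_pos _ (one_le_pow₀ (by norm_num)) _ (by omega)
    have hmax1 : (1:Int) ≤ max_n := le_trans (by nlinarith) hle
    have hL := strlen_toStr_of_pos max_n hmax1
    have hdb := digit_bounds b hb1
    have hbl : (10:Int) ^ (Kb - 1) ≤ b := by
      have h : Kb - 1 = Nat.log 10 b.toNat := by omega
      rw [h]; exact hdb.1
    have hbu : b < (10:Int) ^ Kb := by
      rw [hKbe]; exact hdb.2
    have hdm := digit_bounds max_n hmax1
    have hglow : ((10:Int) ^ Kb) ^ (j + 1) ≤ geom ((10:Int) ^ Kb) (2 + j) := by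
      have h := geom_lower ((10:Int) ^ Kb) (one_le_pow₀ (by norm_num)) (2 + j) (by omega)
      have he : 2 + j - 1 = j + 1 := by omega
      rwa [he] at h
    have hval : (10:Int) ^ (Kb * (j + 2) - 1) ≤ b * geom ((10:Int) ^ Kb) (2 + j) := by
      have h1 : (10:Int) ^ (Kb - 1) * ((10:Int) ^ Kb) ^ (j + 1) ≤ b * geom ((10:Int) ^ Kb) (2 + j) := by
        apply mul_le_mul hbl hglow (by positivity) (by omega)
      calc (10:Int) ^ (Kb * (j + 2) - 1) = (10:Int) ^ (Kb - 1 + Kb * (j + 1)) := by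
            congr 1
            have hx : Kb * (j + 2) = Kb * (j + 1) + Kb := by ring
            omega
      _ = (10:Int) ^ (Kb - 1) * ((10:Int) ^ Kb) ^ (j + 1) := by rw [pow_add, pow_mul]
      _ ≤ _ := h1
    have hexp : Kb * (j + 2) - 1 < Nat.log 10 max_n.toNat + 1 :=
      pow_exp_lt (lt_of_le_of_lt (le_trans hval hle) hdm.2)
    have hKL : (Kb : Int) * ((j : Int) + 2) ≤ PySem.Str.len (PySem.Int.toStr max_n) := by
      have hpos : 1 ≤ Kb * (j + 2) := Nat.mul_pos (by omega) (by omega)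
      have h2 : Kb * (j + 2) ≤ Nat.log 10 max_n.toNat + 1 := by omega
      rw [hL]
      calc (Kb : Int) * ((j : Int) + 2) = ((Kb * (j + 2) : Nat) : Int) := by push_cast; ring
      _ ≤ _ := by exact_mod_cast Int.ofNat_le.mpr h2
    have h2kb : 2 * (Kb : Int) ≤ (Kb : Int) * ((j : Int) + 2) := by nlinarith
    refine ⟨(Kb : Int), by omega, by omega, ((j : Int) + 2), by omega, ?_, b, ?_, ?_, ?_, ?_⟩
    · have h : ((j : Int) + 2) * Kb = (Kb : Int) * (j + 2) := by ring
      rw [h]; exact hKL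
    · have h : ((Kb : Int) - 1).toNat = Kb - 1 := by omega
      rw [h]; exact hbl
    · have h1 : ((Kb : Int)).toNat = Kb := by omega
      rw [h1]; omega
    · have h1 : ((Kb : Int)).toNat = Kb := by omega
      have h2 : ((j : Int) + 2).toNat = j + 2 := by omega
      rw [h1, h2]
      have h : j + 2 = 2 + j := by omega
      rw [h]; exact hle
    · have h1 : ((Kb : Int)).toNat = Kb := by omega
      have h2 : ((j : Int) + 2).toNat = j + 2 := by omega
      rw [h1, h2]
      have h : j + 2 = 2 + j := by omega
      rw [h]; exact hneq

-- ===== VERDICT (by name: the statement is the Claim_ definition above) =====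
theorem generateDoublePatterns_spec : Claim_equal_generateDoublePatterns := by
  unfold Claim_equal_generateDoublePatterns
  intro max_n _
  unfold Spec_generateDoublePatterns generateDoublePatterns generateDoublePatterns_alt
  simp only []
  rw [PySem.List.sorted_id_eq_sorted_id_iff_perm]
  rw [List.perm_ext_iff_of_nodup (PySem.Set.nodup_ofList _)
    (nodup_foldB max_n _ PySem.Set.empty List.nodup_nil)]
  intro x
  rw [PySem.Set.mem_ofList]
  rw [mem_loopK max_n (PySem.Str.len (PySem.Int.toStr max_n))
    ((PySem.Str.len (PySem.Int.toStr max_n) - 1).toNat) 1 (le_refl _) (le_refl 1) [] x]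
  rw [mem_foldB max_n _ (fun b hb => (PySem.List.mem_pyRange_one.mp hb).1) PySem.Set.empty x]
  simp only [PySem.Set.empty, List.not_mem_nil, false_or, PySem.List.mem_pyRange_one]
  exact main_iff max_n x
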